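-- pv_equiv track=rewrite | github.com/itspratham/Python-tutorial | Python_Contents/APAS/rotate_Function.py | rota
-- ===== SOURCE A (Python) =====
-- def rota(arr):
--     arr1 = arr
--     l = []
--     for i in range(len(arr)):
--         k = 0
--         for j in range(len(arr1)):
--             h = arr[j] *j
--             k = k + h
--         l.append(k)
--         f = arr.pop()
--         arr.insert(0,f)
--     return max(l)
-- ===== SOURCE B (Python) =====
-- def rota(arr):
--     n = len(arr)
--     s = sum(arr)
--     f = 0
--     for j, v in enumerate(arr):
--         f += j * v
--     best = f
--     for k in range(1, n):
--         f = f + s - n * arr[n - k]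
--         if f > best:
--             best = f
--     return best
-- ===== Notes on version B (the rewrite author's own statement) =====
-- stated objective: faster
-- what changed: Replaces the O(n^2) rebuild-and-resum over every rotation (done by mutating arr with pop/insert) with the O(n) incremental rotation-sum formula F(k)=F(k-1)+sum(arr)-n*arr[n-k], tracking the running maximum.
-- outside the precondition, e.g. on rota([]): A raises ValueError, B returns 0
-- crash fix: On the empty list A raises ValueError (max of empty sequence); B returns 0, the weighted sum of no elements. — e.g. on rota([]): A raises ValueError, B returns 0
import Mathlib
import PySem

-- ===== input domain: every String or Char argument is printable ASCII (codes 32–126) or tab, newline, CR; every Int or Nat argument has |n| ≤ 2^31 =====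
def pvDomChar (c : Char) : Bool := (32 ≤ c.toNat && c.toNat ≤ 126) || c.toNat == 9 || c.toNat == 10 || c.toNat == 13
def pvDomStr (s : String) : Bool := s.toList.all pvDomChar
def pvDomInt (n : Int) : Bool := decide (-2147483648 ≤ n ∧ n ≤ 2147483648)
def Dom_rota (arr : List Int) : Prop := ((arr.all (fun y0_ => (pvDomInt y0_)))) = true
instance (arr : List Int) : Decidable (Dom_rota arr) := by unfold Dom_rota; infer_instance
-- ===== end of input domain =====

-- B replaces A's O(n^2) recompute-per-rotation (A rotates arr in place n times, restoring it) with the O(n)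
-- incremental formula F(k) = F(k-1) + sum(arr) - n*arr[n-k]; return values agree on all nonempty lists.

-- ===== PORT A =====
-- inner loop: k = sum over j of arr[j]*j (arr1 aliases arr, so its length is the current arr's length)
def rotaInner (arr : List Int) : Int :=
  (PySem.List.pyRange 0 (arr.length : Int) 1).foldl
    (fun k j => k + PySem.List.pyGetD arr j 0 * j) 0

-- outer loop: append k, then f = arr.pop(); arr.insert(0, f)
def rotaLoop : Nat → List Int → List Int → List Int
  | 0, _, l => l
  | i + 1, a, l =>
    let k := rotaInner a
    match PySem.List.pop? a (-1) with
    | some (f, rest) => rotaLoop i (PySem.List.insert rest 0 f) (l ++ [k])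
    | none => l ++ [k]   -- unreachable: pop() only runs when the loop runs, i.e. arr ≠ []

def rota (arr : List Int) : Int :=
  (PySem.List.max? (rotaLoop arr.length arr []) (fun x => x)).getD 0
  -- max([]) raises ValueError in Python; Pre_rota excludes arr = []

-- ===== PORT B =====
def rota_alt (arr : List Int) : Int :=
  let n : Int := arr.length
  let s := arr.foldl (· + ·) 0
  let f := (PySem.List.enumerate arr).foldl (fun acc p => acc + p.1 * p.2) 0
  let r := (PySem.List.pyRange 1 n 1).foldl
    (fun (st : Int × Int) k =>
      let f' := st.1 + s - n * PySem.List.pyGetD arr (n - k) 0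
      (f', if f' > st.2 then f' else st.2)) (f, f)
  r.2

-- ===== PRECONDITION & SPEC =====
-- Pre_ excludes only the empty list, on which A's max([]) raises ValueError.
def Pre_rota (arr : List Int) : Prop := arr ≠ []
instance (arr : List Int) : Decidable (Pre_rota arr) := by unfold Pre_rota; infer_instance
def pvWitness_rota : List Int := [1, 2, 3]

-- On the empty list A raises ValueError (max of empty sequence); B returns 0.
def Raises_rota (arr : List Int) : Prop := arr = []
instance (arr : List Int) : Decidable (Raises_rota arr) := by unfold Raises_rota; infer_instance
def pvRaiseWitness_rota : List Int := []
def pvRaiseWitnessOut_rota : Int := 0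

def Spec_rota (arr : List Int) (out : Int) : Prop := out = rota_alt arr
instance (arr : List Int) (out : Int) : Decidable (Spec_rota arr out) := by unfold Spec_rota; infer_instance

-- ===== CLAIM (what is proved, stated in full; the proofs are below) =====
def Claim_equal_rota : Prop := ∀ (arr : List Int), Dom_rota arr → Pre_rota arr → Spec_rota arr (rota arr)
def Claim_raises_rota : Prop := (∀ (arr : List Int), Dom_rota arr → Raises_rota arr → ¬ Pre_rota arr) ∧ (Dom_rota (pvRaiseWitness_rota) ∧ Raises_rota (pvRaiseWitness_rota) ∧ rota_alt (pvRaiseWitness_rota) = pvRaiseWitnessOut_rota)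

-- ===== LEMMAS AND PROOFS =====

-- weighted sum: wsum a i = sum over positions of (i + position) * element
def wsum : List Int → Int → Int
  | [], _ => 0
  | x :: xs, i => i * x + wsum xs (i + 1)

-- arr rotated right t times (for t ≤ length)
def rotk (t : Nat) (arr : List Int) : List Int :=
  arr.drop (arr.length - t) ++ arr.take (arr.length - t)

theorem wsum_shift (xs : List Int) (i : Int) : wsum xs (i + 1) = wsum xs i + xs.sum := by
  induction xs generalizing i with
  | nil => simp [wsum]
  | cons x xs ih => simp [wsum, ih]; ring

theorem wsum_append_singleton (ys : List Int) (x : Int) (i : Int) :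
    wsum (ys ++ [x]) i = wsum ys i + (i + ys.length) * x := by
  induction ys generalizing i with
  | nil => simp [wsum]
  | cons y ys ih =>
    simp only [List.cons_append, wsum, ih, List.length_cons]
    push_cast
    ring

theorem wsum_rot (ys : List Int) (x : Int) :
    wsum (x :: ys) 0 = wsum (ys ++ [x]) 0 + (ys ++ [x]).sum
      - ((ys ++ [x]).length : Int) * x := by
  have h0 : wsum ys (0 + 1) = wsum ys 0 + ys.sum := wsum_shift ys 0
  simp [wsum, wsum_append_singleton] at *
  linarith [h0]

theorem enum_fold (a : List Int) (s c : Int) :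
    (PySem.List.enumerate a s).foldl (fun acc p => acc + p.1 * p.2) c = c + wsum a s := by
  induction a generalizing s c with
  | nil => simp [PySem.List.enumerate, wsum]
  | cons x xs ih => rw [PySem.List.enumerate_cons]; simp [wsum, ih]; ring

theorem rotaInner_eq_wsum (a : List Int) : rotaInner a = wsum a 0 := by
  have h := enum_fold a 0 0
  rw [PySem.List.enumerate_eq_map_pyRange (d := 0), List.foldl_map] at h
  rw [rotaInner,
    show (fun (k j : Int) => k + PySem.List.pyGetD a j 0 * j)
       = (fun (k j : Int) => k + j * PySem.List.pyGetD a j 0) from by funext k j; ring]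
  simpa using h

theorem rotk_zero (a : List Int) : rotk 0 a = a := by simp [rotk]

theorem rotk_length (t : Nat) (a : List Int) : (rotk t a).length = a.length := by
  simp [rotk]

theorem rotk_sum (t : Nat) (a : List Int) : (rotk t a).sum = a.sum := by
  rw [rotk, List.sum_append, add_comm, ← List.sum_append, List.take_append_drop]

-- decomposition of rotk t a as ys ++ [last] for t < length
theorem rotk_decomp (t : Nat) (a : List Int) (ht : t < a.length) :
    rotk t a = (a.drop (a.length - t) ++ a.take (a.length - t - 1)) ++ [a[a.length - t - 1]'(by omega)]
    ∧ rotk (t + 1) a = a[a.length - t - 1]'(by omega) :: (a.drop (a.length - t) ++ a.take (a.length - t - 1)) := by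
  have hm : a.length - t - 1 < a.length := by omega
  have hsucc : a.length - t = (a.length - t - 1) + 1 := by omega
  constructor
  · conv_lhs => rw [rotk, hsucc, List.take_add_one]
    simp [List.getElem?_eq_getElem hm]
    omega
  · rw [rotk, show a.length - (t + 1) = a.length - t - 1 from by omega,
      List.drop_eq_getElem_cons hm]
    rw [show List.drop (a.length - t - 1 + 1) a = List.drop (a.length - t) a from by rw [← hsucc]]
    simp

-- the F-recurrence
theorem fseq_step (a : List Int) (t : Nat) (ht : t < a.length) :
    wsum (rotk (t + 1) a) 0
      = wsum (rotk t a) 0 + a.sum - (a.length : Int) * a[a.length - t - 1]'(by omega) := by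
  obtain ⟨h1, h2⟩ := rotk_decomp t a ht
  rw [h2, h1, wsum_rot, ← h1, rotk_sum, rotk_length]

theorem rotaLoop_step (a l : List Int) (i t : Nat) (ht : t < a.length) :
    rotaLoop (i + 1) (rotk t a) l
      = rotaLoop i (rotk (t + 1) a) (l ++ [rotaInner (rotk t a)]) := by
  obtain ⟨h1, h2⟩ := rotk_decomp t a ht
  conv_lhs => rw [rotaLoop]
  rw [show PySem.List.pop? (rotk t a) = some (a[a.length - t - 1]'(by omega),
        a.drop (a.length - t) ++ a.take (a.length - t - 1)) from by
      rw [h1]; exact PySem.List.pop?_last _ _]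
  simp only [PySem.List.insert_zero, ← h2]

theorem rotaLoop_eq (a : List Int) (i : Nat) : ∀ (t : Nat) (l : List Int), t + i = a.length →
    rotaLoop i (rotk t a) l = l ++ (List.range i).map (fun j => wsum (rotk (t + j) a) 0) := by
  induction i with
  | zero => intro t l _; simp [rotaLoop]
  | succ i ih =>
    intro t l h
    rw [rotaLoop_step a l i t (by omega), ih (t + 1) _ (by omega),
      List.range_succ_eq_map]
    simp [rotaInner_eq_wsum, Function.comp, Nat.succ_eq_add_one]
    intro j _
    rw [show t + 1 + j = t + (j + 1) from by omega]

theorem if_fold_eq_max (l : List Int) : ∀ (c : Int),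
    l.foldl (fun b y => if y > b then y else b) c = l.foldl max c := by
  induction l with
  | nil => intro c; rfl
  | cons y ys ih =>
    intro c
    have : (if y > c then y else c) = max c y := by
      rcases lt_or_ge c y with h | h
      · rw [if_pos h, max_eq_right h.le]
      · rw [if_neg (not_lt.mpr h), max_eq_left h]
    simp only [List.foldl_cons, this, ih]

theorem rota_alt_loop (arr : List Int) (m : Nat) (hm1 : 1 ≤ m) (hmn : m ≤ arr.length) :
    (PySem.List.pyRange 1 (m : Int)).foldl
      (fun (st : Int × Int) k =>
        let f' := st.1 + arr.sum - (arr.length : Int) * PySem.List.pyGetD arr ((arr.length : Int) - k) 0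
        (f', if f' > st.2 then f' else st.2)) (wsum arr 0, wsum arr 0)
    = (wsum (rotk (m - 1) arr) 0,
       ((List.range (m - 1)).map (fun j => wsum (rotk (j + 1) arr) 0)).foldl
         (fun b y => if y > b then y else b) (wsum arr 0)) := by
  induction m with
  | zero => omega
  | succ m ih =>
    rcases Nat.lt_or_ge m 1 with h1 | hm
    · have hm0 : m = 0 := by omega
      subst hm0
      simp [PySem.List.pyRange_one_eq_nil (by norm_num : (1:Int) ≤ 1), rotk_zero]
    · have hmlt : m < arr.length := by omega
      have hget : PySem.List.pyGetD arr ((arr.length : Int) - (m : Int)) 0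
          = arr[arr.length - m]'(by omega) := by
        rw [PySem.List.pyGetD_eq_getElem arr 0 (by omega) (by omega)]
        congr 1
        omega
      have hstep := fseq_step arr (m - 1) (by omega)
      rw [show (m - 1) + 1 = m from by omega] at hstep
      have hidx : arr.length - (m - 1) - 1 = arr.length - m := by omega
      rw [show ((m + 1 : Nat) : Int) = (m : Int) + 1 from by push_cast; ring,
        PySem.List.pyRange_one_succ_right (by exact_mod_cast hm),
        List.foldl_append, ih hm (by omega)]
      simp only [List.foldl_cons, List.foldl_nil, Nat.add_sub_cancel]
      conv_rhs => rw [show m = (m - 1) + 1 from by omega, List.range_succ]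
      rw [List.map_append, List.foldl_append]
      simp only [List.map_cons, List.map_nil, List.foldl_cons, List.foldl_nil]
      rw [show (m - 1) + 1 = m from by omega]
      have hfst : wsum (rotk (m - 1) arr) 0 + arr.sum
          - (arr.length : Int) * PySem.List.pyGetD arr ((arr.length : Int) - (m : Int)) 0
          = wsum (rotk m arr) 0 := by
        simp only [hidx] at hstep
        rw [hget]
        exact hstep.symm
      rw [hfst]

theorem rota_alt_eq (arr : List Int) (hn : 1 ≤ arr.length) :
    rota_alt arr
      = ((List.range (arr.length - 1)).map (fun j => wsum (rotk (j + 1) arr) 0)).foldl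
          (fun b y => if y > b then y else b) (wsum arr 0) := by
  have hf : (PySem.List.enumerate arr).foldl (fun acc p => acc + p.1 * p.2) 0 = wsum arr 0 := by
    simpa using enum_fold arr 0 0
  have hs : arr.foldl (· + ·) 0 = arr.sum := List.sum_eq_foldl.symm
  have hloop := rota_alt_loop arr arr.length hn (le_refl _)
  simp only [rota_alt, hf, hs, hloop]

theorem rota_A_eq (arr : List Int) (hn : 1 ≤ arr.length) :
    rota arr
      = ((List.range (arr.length - 1)).map (fun j => wsum (rotk (j + 1) arr) 0)).foldl
          max (wsum arr 0) := by
  have hA : rotaLoop arr.length arr []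
      = (List.range arr.length).map (fun j => wsum (rotk j arr) 0) := by
    have h := rotaLoop_eq arr arr.length 0 [] (by omega)
    simpa [rotk_zero] using h
  have hsplit : (List.range arr.length).map (fun j => wsum (rotk j arr) 0)
      = wsum arr 0 :: (List.range (arr.length - 1)).map (fun j => wsum (rotk (j + 1) arr) 0) := by
    conv_lhs => rw [show arr.length = (arr.length - 1) + 1 from by omega, List.range_succ_eq_map]
    simp only [List.map_cons, List.map_map, rotk_zero]
    constructor
  rw [rota, hA, hsplit, PySem.List.max?_id_cons]
  rfl

-- ===== VERDICT (by name: the statement is the Claim_ definition above) =====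
theorem rota_spec : Claim_equal_rota := by
  unfold Claim_equal_rota
  intro arr _ hpre
  unfold Spec_rota
  have hn : 1 ≤ arr.length := List.length_pos_of_ne_nil hpre
  rw [rota_A_eq arr hn, rota_alt_eq arr hn, if_fold_eq_max]

@[simp] theorem rota_raises : Claim_raises_rota := by
  unfold Claim_raises_rota
  exact ⟨fun arr _ h => by simp [Raises_rota, Pre_rota] at *; exact h, by decide⟩
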